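-- pv_equiv track=rewrite | github.com/DanielLepeVega/TecProjects | Programacion/Actividades/Final_A01633986.py | ganador_etapa
-- ===== SOURCE A (Python) =====
-- def ganador_etapa (jugadores, tiempos): #me falto hacerlo para cada jugador por etapa
--     listavacia = []
--     for listas in tiempos:
--         tiempo=min(listas)
--         listavacia.append(tiempo)
--     menor=min(listavacia)
--     ganadortiempo=listavacia.index(menor)
--     ganador=jugadores[ganadortiempo]
--     return ganador
-- ===== SOURCE B (Python) =====
-- def ganador_etapa(jugadores, tiempos):
--     # global-minimum approach: find the smallest time anywhere, then the first
--     # stage list that contains it; that list's owner is the winner (first-wins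
--     # on ties, since the first list attaining the overall minimum contains it).
--     menor = min(v for fila in tiempos for v in fila)
--     i = 0
--     for fila in tiempos:
--         if menor in fila:
--             return jugadores[i]
--         i += 1
-- ===== Notes on version B (the rewrite author's own statement) =====
-- stated objective: alternative
-- what changed: B computes no per-row minima list at all: it takes the single global minimum over the flattened times and then returns the owner of the first row containing that value by membership test, replacing A's build-minima/min/index/lookup pipeline.
-- outside the precondition, e.g. on ganador_etapa(['a'], [[1], [2]]): A returns 'a', B returns 'a'
import Mathlib
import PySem

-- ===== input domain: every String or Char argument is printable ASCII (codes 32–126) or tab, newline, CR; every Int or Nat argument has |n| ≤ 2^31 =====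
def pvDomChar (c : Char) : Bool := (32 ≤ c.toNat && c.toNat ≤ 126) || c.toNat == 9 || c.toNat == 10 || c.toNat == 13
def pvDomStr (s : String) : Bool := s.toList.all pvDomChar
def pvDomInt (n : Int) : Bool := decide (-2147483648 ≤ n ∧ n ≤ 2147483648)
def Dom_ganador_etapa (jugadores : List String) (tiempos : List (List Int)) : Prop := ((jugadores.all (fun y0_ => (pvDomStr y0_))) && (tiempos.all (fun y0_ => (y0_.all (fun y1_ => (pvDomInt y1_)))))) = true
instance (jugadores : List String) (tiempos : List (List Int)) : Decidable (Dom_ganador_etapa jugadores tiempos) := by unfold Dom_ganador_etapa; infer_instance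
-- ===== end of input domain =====

-- B drops A's per-row minima list entirely: it takes the one global minimum of all times and
-- returns the owner of the first row containing it; objective: alternative, not faster.

-- ===== PORT A =====
def ganador_etapa (jugadores : List String) (tiempos : List (List Int)) : String :=
  let listavacia := tiempos.foldl (fun acc listas =>
      acc ++ [(PySem.List.min? listas (fun x => x)).getD 0]) ([] : List Int)
  let menor := (PySem.List.min? listavacia (fun x => x)).getD 0
  let ganadortiempo := (PySem.List.index? listavacia menor).getD 0
  PySem.List.pyGetD jugadores (ganadortiempo : Int) ""

-- ===== PORT B =====
-- the 'for fila in tiempos: if menor in fila: return jugadores[i]' loop with its counter i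
def gAltLoop (jugadores : List String) (menor : Int) (i : Nat) : List (List Int) → String
  | [] => ""
  | fila :: rest =>
      if menor ∈ fila then PySem.List.pyGetD jugadores (i : Int) ""
      else gAltLoop jugadores menor (i + 1) rest

def ganador_etapa_alt (jugadores : List String) (tiempos : List (List Int)) : String :=
  let menor := (PySem.List.min? (tiempos.flatMap (fun fila => fila)) (fun v => v)).getD 0
  gAltLoop jugadores menor 0 tiempos

-- ===== PRECONDITION & SPEC =====
-- Pre_ excludes the inputs where Python A raises (empty tiempos, an empty sublist: ValueError from min;
-- and, via the length bound, the IndexError when jugadores is shorter than tiempos).  The length bound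
-- also excludes some inputs with len(tiempos) > len(jugadores) on which A happens to return because the
-- earliest minimum falls at an index below len(jugadores): whether A returns there depends on the data
-- values, not on a closed-form shape, so Pre_ keeps to the natural parallel-list domain.
def Pre_ganador_etapa (jugadores : List String) (tiempos : List (List Int)) : Prop :=
  tiempos ≠ [] ∧ (∀ l ∈ tiempos, l ≠ []) ∧ tiempos.length ≤ jugadores.length
instance (jugadores : List String) (tiempos : List (List Int)) : Decidable (Pre_ganador_etapa jugadores tiempos) := by unfold Pre_ganador_etapa; infer_instance

def pvWitness_ganador_etapa : List String × List (List Int) := (["ana", "bo"], [[3, 2], [1]])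

def Spec_ganador_etapa (jugadores : List String) (tiempos : List (List Int)) (out : String) : Prop := out = ganador_etapa_alt jugadores tiempos
instance (jugadores : List String) (tiempos : List (List Int)) (out : String) : Decidable (Spec_ganador_etapa jugadores tiempos out) := by unfold Spec_ganador_etapa; infer_instance

-- ===== CLAIM (what is proved, stated in full; the proofs are below) =====
def Claim_equal_ganador_etapa : Prop := ∀ (jugadores : List String) (tiempos : List (List Int)), Dom_ganador_etapa jugadores tiempos → Pre_ganador_etapa jugadores tiempos → Spec_ganador_etapa jugadores tiempos (ganador_etapa jugadores tiempos)

-- ===== LEMMAS AND PROOFS =====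

-- the per-row key A compares by: min of a sublist (0 on the empty list, outside Pre_)
def pvKey (l : List Int) : Int := (PySem.List.min? l (fun x => x)).getD 0

theorem pvKey_cons (a : Int) (t : List Int) : pvKey (a :: t) = t.foldl min a := by
  simp [pvKey, PySem.List.min?_id_cons]

theorem foldl_min_min (t : List Int) (a x : Int) :
    t.foldl min (min a x) = min a (t.foldl min x) := by
  induction t generalizing x with
  | nil => rfl
  | cons y t ih => simp only [List.foldl_cons, min_assoc, ih]

-- folding min over the flattened rows = folding min over the per-row minima
theorem fmin_flatten (xs : List (List Int)) (hrows : ∀ l ∈ xs, l ≠ []) :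
    ∀ c : Int, (xs.flatMap (fun fila => fila)).foldl min c = (xs.map pvKey).foldl min c := by
  induction xs with
  | nil => intro c; rfl
  | cons x xs ih =>
    intro c
    obtain ⟨a, t, rfl⟩ : ∃ a t, x = a :: t := by
      cases x with
      | nil => exact absurd rfl (hrows _ (by simp))
      | cons a t => exact ⟨a, t, rfl⟩
    have ih' := ih (fun l hl => hrows l (by simp [hl]))
    simp only [List.flatMap_cons, List.foldl_append, List.map_cons, List.foldl_cons, pvKey_cons]
    rw [ih']
    congr 1
    have h1 : t.foldl min (min c a) = min c (t.foldl min a) := foldl_min_min t c a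
    simpa [min_comm] using h1

theorem min?_flatten_eq (xs : List (List Int)) (hne : xs ≠ [])
    (hrows : ∀ l ∈ xs, l ≠ []) :
    PySem.List.min? (xs.flatMap (fun fila => fila)) (fun v => v)
      = PySem.List.min? (xs.map pvKey) (fun v => v) := by
  obtain ⟨x, xs, rfl⟩ : ∃ y ys, xs = y :: ys := by
    cases xs with
    | nil => exact absurd rfl hne
    | cons y ys => exact ⟨y, ys, rfl⟩
  obtain ⟨a, t, rfl⟩ : ∃ a t, x = a :: t := by
    cases x with
    | nil => exact absurd rfl (hrows _ (by simp))
    | cons a t => exact ⟨a, t, rfl⟩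
  have hrows' : ∀ l ∈ xs, l ≠ [] := fun l hl => hrows l (by simp [hl])
  simp only [List.flatMap_cons, List.map_cons, List.cons_append,
    PySem.List.min?_id_cons, List.foldl_append, pvKey_cons]
  rw [fmin_flatten xs hrows']

-- the B loop finds exactly A's first index of the minimal per-row key
theorem loop_eq (ys : List String) (m : Int) (xs : List (List Int))
    (hrows : ∀ l ∈ xs, l ≠ [])
    (hlb : ∀ l ∈ xs, m ≤ pvKey l)
    (hatt : ∃ l ∈ xs, pvKey l = m) :
    ∀ i : Nat, gAltLoop ys m i xs
      = ys.getD (i + (PySem.List.index? (xs.map pvKey) m).getD 0) "" := by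
  induction xs with
  | nil => obtain ⟨l, hl, _⟩ := hatt; simp at hl
  | cons x xs ih =>
    intro i
    have hxne : x ≠ [] := hrows x (by simp)
    obtain ⟨M, hM⟩ : ∃ M, PySem.List.min? x (fun v => v) = some M := by
      rcases h : PySem.List.min? x (fun v => v) with _ | M
      · exact absurd (PySem.List.min?_eq_none_iff x _ |>.mp h) hxne
      · exact ⟨M, rfl⟩
    have hKx : pvKey x = M := by simp [pvKey, hM]
    have hmem_iff : m ∈ x ↔ pvKey x = m := by
      constructor
      · intro hmx
        have h1 : M ≤ m := PySem.List.min?_isMin hM m hmx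
        have h2 : m ≤ M := hKx ▸ hlb x (by simp)
        rw [hKx]; omega
      · intro hk
        have hm : M ∈ x := PySem.List.min?_mem hM
        rw [← hKx, hk] at hm
        exact hm
    by_cases hx : pvKey x = m
    · have hmx : m ∈ x := hmem_iff.mpr hx
      simp only [gAltLoop, if_pos hmx, List.map_cons, hx,
        PySem.List.index?_cons_self, Option.getD_some, Nat.add_zero,
        PySem.List.pyGetD_natCast]
    · have hmx : m ∉ x := fun h => hx (hmem_iff.mp h)
      have hatt' : ∃ l ∈ xs, pvKey l = m := by
        obtain ⟨l, hl, hlv⟩ := hatt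
        rcases List.mem_cons.mp hl with rfl | hl
        · exact absurd hlv hx
        · exact ⟨l, hl, hlv⟩
      obtain ⟨k, hk⟩ : ∃ k, PySem.List.index? (xs.map pvKey) m = some k := by
        obtain ⟨l, hl, hlv⟩ := hatt'
        have : m ∈ xs.map pvKey := hlv ▸ List.mem_map_of_mem hl
        rcases h : PySem.List.index? (xs.map pvKey) m with _ | k
        · exact absurd ((PySem.List.index?_eq_none_iff _ _).mp h) (by simpa using this)
        · exact ⟨k, rfl⟩
      have hih := ih (fun l hl => hrows l (by simp [hl]))
        (fun l hl => hlb l (by simp [hl])) hatt' (i + 1)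
      rw [hk] at hih
      simp only [gAltLoop, if_neg hmx, List.map_cons]
      rw [PySem.List.index?_cons_of_ne _ hx, hk]
      simp only [Option.map_some, Option.getD_some] at hih ⊢
      rw [hih]
      congr 1
      omega

-- ===== VERDICT (by name: the statement is the Claim_ definition above) =====
theorem ganador_etapa_spec : Claim_equal_ganador_etapa := by
  intro jugadores tiempos _ hpre
  obtain ⟨hne, hrows, _⟩ := hpre
  unfold Spec_ganador_etapa ganador_etapa ganador_etapa_alt
  simp only [PySem.List.foldl_append_singleton_eq_map, List.nil_append]
  rw [show (fun listas : List Int => (PySem.List.min? listas (fun x => x)).getD 0) = pvKey from rfl]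
  rw [min?_flatten_eq tiempos hne hrows]
  obtain ⟨M, hM⟩ : ∃ M, PySem.List.min? (tiempos.map pvKey) (fun v => v) = some M := by
    rcases h : PySem.List.min? (tiempos.map pvKey) (fun v => v) with _ | M
    · exact absurd ((PySem.List.min?_eq_none_iff _ _).mp h) (by simpa using hne)
    · exact ⟨M, rfl⟩
  have hatt : ∃ l ∈ tiempos, pvKey l = M := by
    have := PySem.List.min?_mem hM
    obtain ⟨l, hl, hlv⟩ := List.mem_map.mp this
    exact ⟨l, hl, hlv⟩
  have hlb : ∀ l ∈ tiempos, M ≤ pvKey l := fun l hl =>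
    PySem.List.min?_isMin hM _ (List.mem_map_of_mem hl)
  rw [hM]
  simp only [Option.getD_some]
  rw [PySem.List.pyGetD_natCast, loop_eq jugadores M tiempos hrows hlb hatt 0]
  simp
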